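-- pv_equiv track=rewrite | github.com/pypi-data/pypi-mirror-403 | packages/gha-workflow-linter/gha_workflow_linter-1.0.2.tar.gz/gha_workflow_linter-1.0.2/src/gha_workflow_linter/auto_fix.py | _find_most_specific_version_tag
-- ===== SOURCE A (Python) =====
-- def _parse_version(tag: str) -> tuple[int, int, int]:
--     """Extract major, minor, patch from a version tag for sorting.
--
--     Args:
--         tag: A version tag (e.g., 'v4.31.0', 'v4.31', '1.2.3', '0.9')
--
--     Returns:
--         A tuple of (major, minor, patch) as integers
--
--     Raises:
--         ValueError: If version segments contain non-numeric characters
--     """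
--     # Strip optional 'v' prefix and any pre-release/metadata suffixes
--     version = tag.lstrip("v").split("-")[0].split("+")[0]
--     parts = version.split(".")
--
--     # Parse and validate version components
--     try:
--         major = int(parts[0]) if len(parts) > 0 else 0
--         minor = int(parts[1]) if len(parts) > 1 else 0
--         patch = int(parts[2]) if len(parts) > 2 else 0
--     except ValueError as e:
--         raise ValueError(
--             f"Invalid version tag '{tag}': version segments must be numeric. "
--             f"Found non-numeric value in '{version}'"
--         ) from e
--
--     return (major, minor, patch)
--
-- def _get_version_specificity(tag: str) -> int:
--     """
--     Get the specificity level of a version tag.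
--
--     Returns:
--         3 for full semver (v1.2.3), 2 for major.minor (v1.2), 1 for major only (v1)
--
--     This helps prefer v8.0.0 over v8 when both point to the same SHA.
--     """
--     version = tag.lstrip("v").split("-")[0].split("+")[0]
--     parts = version.split(".")
--     return len([p for p in parts if p])
--
-- def _find_most_specific_version_tag(
--     tag: str, sha: str, all_tags: list[tuple[str, str]]
-- ) -> str:
--     """
--     Find the most specific semantic version tag for a given SHA.
--
--     For example, if we get 'v8' but 'v8.0.0' also points to the same SHA,
--     return 'v8.0.0' as it's more specific.
--
--     Args:
--         tag: The tag we found (e.g., 'v8')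
--         sha: The commit SHA
--         all_tags: List of (tag_name, sha) tuples from the repository
--
--     Returns:
--         The most specific version tag pointing to the same SHA
--     """
--     # Find all tags pointing to the same SHA
--     matching_tags = [t for t, s in all_tags if s == sha]
--
--     if not matching_tags:
--         return tag
--
--     # Parse the base version from the original tag
--     try:
--         base_version = _parse_version(tag)
--     except ValueError:
--         return tag
--
--     # Find all tags with the same base version
--     same_version_tags = []
--     for t in matching_tags:
--         try:
--             if _parse_version(t) == base_version:
--                 same_version_tags.append(t)
--         except ValueError:
--             continue
--
--     if not same_version_tags:
--         return tag
--
--     # Sort by specificity (most specific first)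
--     sorted_by_specificity = sorted(
--         same_version_tags,
--         key=_get_version_specificity,
--         reverse=True
--     )
--
--     return sorted_by_specificity[0]
-- ===== SOURCE B (Python) =====
-- def _parse_version(tag: str) -> tuple[int, int, int]:
--     version = tag.lstrip("v").split("-")[0].split("+")[0]
--     parts = version.split(".")
--     try:
--         major = int(parts[0]) if len(parts) > 0 else 0
--         minor = int(parts[1]) if len(parts) > 1 else 0
--         patch = int(parts[2]) if len(parts) > 2 else 0
--     except ValueError as e:
--         raise ValueError(
--             f"Invalid version tag '{tag}': version segments must be numeric. "
--             f"Found non-numeric value in '{version}'"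
--         ) from e
--     return (major, minor, patch)
--
--
-- def _get_version_specificity(tag: str) -> int:
--     version = tag.lstrip("v").split("-")[0].split("+")[0]
--     parts = version.split(".")
--     return len([p for p in parts if p])
--
--
-- def _find_most_specific_version_tag(
--     tag: str, sha: str, all_tags: list[tuple[str, str]]
-- ) -> str:
--     """Single pass over all_tags keeping a running best (tag, specificity);
--     strict > keeps the first occurrence among ties, no intermediate lists or sort."""
--     try:
--         base_version = _parse_version(tag)
--     except ValueError:
--         return tag
--
--     best = None
--     best_spec = -1
--     for t, s in all_tags:
--         if s != sha:
--             continue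
--         try:
--             if _parse_version(t) != base_version:
--                 continue
--         except ValueError:
--             continue
--         sp = _get_version_specificity(t)
--         if sp > best_spec:
--             best, best_spec = t, sp
--     return best if best is not None else tag
-- ===== Notes on version B (the rewrite author's own statement) =====
-- stated objective: simpler
-- what changed: Replaced A's build-matching-list, filter-by-version, sort-by-specificity pipeline with a single pass over all_tags that keeps a running best (tag, specificity), using strict > to preserve the stable sort's first-occurrence tie-break.
import Mathlib
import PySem

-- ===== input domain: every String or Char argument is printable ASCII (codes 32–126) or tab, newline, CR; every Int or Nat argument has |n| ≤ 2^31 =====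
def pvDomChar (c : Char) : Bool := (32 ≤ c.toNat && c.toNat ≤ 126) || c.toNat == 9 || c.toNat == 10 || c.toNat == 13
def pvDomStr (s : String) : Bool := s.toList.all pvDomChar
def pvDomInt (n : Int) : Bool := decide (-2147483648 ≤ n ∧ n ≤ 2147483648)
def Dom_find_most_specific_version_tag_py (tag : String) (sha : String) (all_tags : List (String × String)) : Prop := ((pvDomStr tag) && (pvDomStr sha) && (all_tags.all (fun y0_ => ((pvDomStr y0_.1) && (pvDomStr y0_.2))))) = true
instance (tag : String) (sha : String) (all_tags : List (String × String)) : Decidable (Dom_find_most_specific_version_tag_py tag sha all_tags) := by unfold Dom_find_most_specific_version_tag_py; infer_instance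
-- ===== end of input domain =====

-- B replaces A's build-filter-filter-sort pipeline by a single pass over all_tags keeping a running best (tag, specificity): simpler, no intermediate lists, no sort.


-- ===== PORT A =====
-- module helpers shared by both Pythons (_parse_version / _get_version_specificity)
-- tag.lstrip("v").split("-")[0].split("+")[0]; lstrip("v") = drop leading 'v's (exact hand port of lstrip with a one-char set)
def pvBaseChars (tag : String) : List Char :=
  ((PySem.Chars.splitOn ((PySem.Chars.splitOn (tag.toList.dropWhile (· == 'v')) ['-']).headD []) ['+']).headD [])

-- _parse_version: none exactly where Python raises ValueError
def parseVersion? (tag : String) : Option (Int × Int × Int) :=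
  let parts := PySem.Chars.splitOn (pvBaseChars tag) ['.']
  let major := if parts.length > 0 then PySem.Int.ofChars? (parts.getD 0 []) else some 0
  let minor := if parts.length > 1 then PySem.Int.ofChars? (parts.getD 1 []) else some 0
  let patch := if parts.length > 2 then PySem.Int.ofChars? (parts.getD 2 []) else some 0
  match major, minor, patch with
  | some a, some b, some c => some (a, b, c)
  | _, _, _ => none

-- _get_version_specificity
def versionSpecificity (tag : String) : Int :=
  ((PySem.Chars.splitOn (pvBaseChars tag) ['.']).filter (fun p => !p.isEmpty)).length

def find_most_specific_version_tag_py (tag : String) (sha : String) (all_tags : List (String × String)) : String :=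
  let matching_tags := (all_tags.filter (fun p => p.2 == sha)).map (fun p => p.1)
  if matching_tags.isEmpty then tag
  else
    match parseVersion? tag with
    | none => tag
    | some base_version =>
      let same_version_tags := matching_tags.filter (fun t => parseVersion? t == some base_version)
      if same_version_tags.isEmpty then tag
      else
        match PySem.List.sorted same_version_tags versionSpecificity true with
        | [] => tag  -- unreachable: sorted of a nonempty list is nonempty
        | t :: _ => t

-- ===== PORT B =====
-- the loop body of B (state = (best, best_spec))
def pvBStep (sha : String) (base_version : Int × Int × Int)
    (acc : Option String × Int) (p : String × String) : Option String × Int :=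
  if p.2 != sha then acc
  else match parseVersion? p.1 with
    | none => acc
    | some v =>
      if v != base_version then acc
      else
        let sp := versionSpecificity p.1
        if sp > acc.2 then (some p.1, sp) else acc

def find_most_specific_version_tag_py_alt (tag : String) (sha : String) (all_tags : List (String × String)) : String :=
  match parseVersion? tag with
  | none => tag
  | some base_version =>
    let best := all_tags.foldl (pvBStep sha base_version) (none, -1)
    match best.1 with
    | some t => t
    | none => tag

-- ===== PRECONDITION & SPEC =====
def Spec_find_most_specific_version_tag_py (tag : String) (sha : String) (all_tags : List (String × String)) (out : String) : Prop := out = find_most_specific_version_tag_py_alt tag sha all_tags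
instance (tag : String) (sha : String) (all_tags : List (String × String)) (out : String) : Decidable (Spec_find_most_specific_version_tag_py tag sha all_tags out) := by unfold Spec_find_most_specific_version_tag_py; infer_instance

-- ===== CLAIM (what is proved, stated in full; the proofs are below) =====
def Claim_equal_find_most_specific_version_tag_py : Prop := ∀ (tag : String) (sha : String) (all_tags : List (String × String)), Dom_find_most_specific_version_tag_py tag sha all_tags → Spec_find_most_specific_version_tag_py tag sha all_tags (find_most_specific_version_tag_py tag sha all_tags)

-- ===== LEMMAS AND PROOFS =====

-- the step of PySem.List.max? (a running first-max scan)
def pvMaxStep (key : String → Int) (o : Option String) (x : String) : Option String :=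
  match o with
  | none => some x
  | some m => if key m < key x then some x else some m

-- B's state as a function of the running max of the filtered prefix
def pvPack (o : Option String) : Option String × Int :=
  match o with
  | none => (none, -1)
  | some m => (some m, versionSpecificity m)

theorem head?_insertBy {α : Type} (before : α → α → Bool) (x : α) (acc : List α) :
    (PySem.List.insertBy before x acc).head? =
      some (match acc with | [] => x | h :: _ => if before x h then x else h) := by
  cases acc with
  | nil => simp [PySem.List.insertBy]
  | cons h t =>
    by_cases hb : before x h
    · simp [PySem.List.insertBy, hb]
    · simp [PySem.List.insertBy, hb]

theorem foldl_insertBy_head? (key : String → Int) (l : List String) (acc : List String) :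
    (l.foldl (fun acc x => PySem.List.insertBy (fun a b => decide (key b < key a)) x acc) acc).head? =
      l.foldl (pvMaxStep key) acc.head? := by
  induction l generalizing acc with
  | nil => rfl
  | cons x xs ih =>
    simp only [List.foldl_cons]
    rw [ih]
    congr 1
    rw [head?_insertBy]
    cases acc with
    | nil => rfl
    | cons h t =>
      by_cases hb : key h < key x
      · simp [pvMaxStep, hb]
      · simp [pvMaxStep, hb]

theorem max?_eq_foldl (key : String → Int) (l : List String) :
    PySem.List.max? l key = l.foldl (pvMaxStep key) none := by
  unfold PySem.List.max?
  apply List.foldl_ext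
  intro a b _
  cases a <;> rfl

theorem head?_sorted_rev (key : String → Int) (l : List String) :
    (PySem.List.sorted l key true).head? = PySem.List.max? l key := by
  rw [PySem.List.sorted_rev_eq_foldl_insertBy, foldl_insertBy_head? key l [], max?_eq_foldl]
  rfl

-- the list A filters out of all_tags
def pvFiltered (sha : String) (base : Int × Int × Int) (l : List (String × String)) : List String :=
  (((l.filter (fun p => p.2 == sha)).map (fun p => p.1)).filter
    (fun t => parseVersion? t == some base))

theorem specificity_nonneg (t : String) : 0 ≤ versionSpecificity t := by
  unfold versionSpecificity
  exact Int.natCast_nonneg _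

theorem bfold_eq (sha : String) (base : Int × Int × Int) (l : List (String × String)) :
    ∀ acc : Option String,
      l.foldl (pvBStep sha base) (pvPack acc) =
        pvPack ((pvFiltered sha base l).foldl (pvMaxStep (versionSpecificity)) acc) := by
  induction l with
  | nil => intro acc; rfl
  | cons p ps ih =>
    intro acc
    by_cases hs : p.2 = sha
    · cases hv : parseVersion? p.1 with
      | none =>
        have hstep : pvBStep sha base (pvPack acc) p = pvPack acc := by
          simp [pvBStep, hs, hv]
        simp only [List.foldl_cons, hstep, ih]
        simp [pvFiltered, hs, hv]
      | some v =>
        by_cases hb : v = base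
        · -- p.1 enters the filtered list; B compares sp > acc.2
          have hmem : pvFiltered sha base (p :: ps) =
              p.1 :: pvFiltered sha base ps := by
            simp [pvFiltered, hs, hv, hb]
          rw [hmem]
          simp only [List.foldl_cons]
          have hstep : pvBStep sha base (pvPack acc) p =
              pvPack (pvMaxStep versionSpecificity acc p.1) := by
            cases acc with
            | none =>
              have : versionSpecificity p.1 > (-1 : Int) := by
                have := specificity_nonneg p.1; omega
              simp [pvBStep, hs, hv, hb, pvPack, pvMaxStep, this]
            | some m =>
              by_cases hlt : versionSpecificity m < versionSpecificity p.1
              · simp [pvBStep, hs, hv, hb, pvPack, pvMaxStep, hlt]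
              · simp [pvBStep, hs, hv, hb, pvPack, pvMaxStep, hlt]
          rw [hstep, ih]
        · have hstep : pvBStep sha base (pvPack acc) p = pvPack acc := by
            simp [pvBStep, hs, hv, hb]
          simp only [List.foldl_cons, hstep, ih]
          simp [pvFiltered, hs, hv, hb]
    · have hstep : pvBStep sha base (pvPack acc) p = pvPack acc := by
        simp [pvBStep, hs]

      simp only [List.foldl_cons, hstep, ih]
      simp [pvFiltered, hs]


-- ===== VERDICT (by name: the statement is the Claim_ definition above) =====
theorem find_most_specific_version_tag_py_spec : Claim_equal_find_most_specific_version_tag_py := by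
  intro tag sha all_tags _
  unfold Spec_find_most_specific_version_tag_py
  unfold find_most_specific_version_tag_py find_most_specific_version_tag_py_alt
  cases hp : parseVersion? tag with
  | none => simp
  | some base =>
    simp only []
    have hB : all_tags.foldl (pvBStep sha base) (none, -1) =
        pvPack (PySem.List.max? (pvFiltered sha base all_tags) versionSpecificity) := by
      rw [max?_eq_foldl]
      exact bfold_eq sha base all_tags none
    rw [hB]
    cases hm : PySem.List.max? (pvFiltered sha base all_tags) versionSpecificity with
    | none =>
      -- filtered list is empty: both sides return tag
      have hnil : pvFiltered sha base all_tags = [] :=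
        (PySem.List.max?_eq_none_iff _ _).mp hm
      simp only [pvPack]
      by_cases hmt : ((all_tags.filter (fun p => p.2 == sha)).map (fun p => p.1)).isEmpty
      · simp [hmt]
      · simp only [hmt, if_false, Bool.false_eq_true]
        have : (((all_tags.filter (fun p => p.2 == sha)).map (fun p => p.1)).filter
            (fun t => parseVersion? t == some base)) = [] := hnil
        simp [this]
    | some m =>
      have hne : pvFiltered sha base all_tags ≠ [] := by
        intro h
        rw [h] at hm
        simp [PySem.List.max?] at hm
      have hmt : ¬ ((all_tags.filter (fun p => p.2 == sha)).map (fun p => p.1)).isEmpty := by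
        intro h
        apply hne
        unfold pvFiltered
        rw [List.isEmpty_iff.mp h]
        simp
      have hsame : ¬ (pvFiltered sha base all_tags).isEmpty := by
        simpa [List.isEmpty_iff] using hne
      have hhead : (PySem.List.sorted (pvFiltered sha base all_tags) versionSpecificity true).head? = some m := by
        rw [head?_sorted_rev]; exact hm
      simp only [pvPack, Bool.not_eq_true] at *
      simp only [hmt, if_false, Bool.false_eq_true]
      unfold pvFiltered at hhead hsame
      simp only [hsame, if_false, Bool.false_eq_true]
      cases hsort : PySem.List.sorted (((all_tags.filter (fun p => p.2 == sha)).map (fun p => p.1)).filter (fun t => parseVersion? t == some base)) versionSpecificity true with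
      | nil => rw [hsort] at hhead; simp at hhead
      | cons t ts => rw [hsort] at hhead; simp at hhead; exact hhead
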